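-- pv_equiv track=rewrite | github.com/kmanasi95/HackLand_Election | HackLand_Election.py | electionWinner
-- ===== SOURCE A (Python) =====
-- from collections import Counter
--
-- def electionWinner(votes):
--     counterList = {}
--     newList = []
--
--     #Counter creates a dictionary with keys as names and values as number of votes
--     counterList.update(Counter(votes))
--
--     #Calculating the maximum number of votes
--     maxVotes = max(counterList.values())
--
--     for key, value in counterList.items():
--         if value == maxVotes:
--             #For same number of votes, add all the names in newList
--             newList.append(key)
--
--     #Sort the list in reverse order, so that the last name will be on the top
--     answer = sorted(newList, reverse = True)
--
--     return answer[0]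
-- ===== SOURCE B (Python) =====
-- def electionWinner(votes):
--     counts = {}
--     for v in votes:
--         counts[v] = counts.get(v, 0) + 1
--     items = iter(counts.items())
--     best_name, best_count = next(items)
--     for name, count in items:
--         if count > best_count or (count == best_count and name > best_name):
--             best_name, best_count = name, count
--     return best_name
-- ===== Notes on version B (the rewrite author's own statement) =====
-- stated objective: simpler
-- what changed: Replaces A's three phases (max over values, filter the tied names, reverse-sort and take the head) by a single maintaining pass over the counted items that keeps the candidate with the lexicographically-largest name among those with the most votes.
import Mathlib
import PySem

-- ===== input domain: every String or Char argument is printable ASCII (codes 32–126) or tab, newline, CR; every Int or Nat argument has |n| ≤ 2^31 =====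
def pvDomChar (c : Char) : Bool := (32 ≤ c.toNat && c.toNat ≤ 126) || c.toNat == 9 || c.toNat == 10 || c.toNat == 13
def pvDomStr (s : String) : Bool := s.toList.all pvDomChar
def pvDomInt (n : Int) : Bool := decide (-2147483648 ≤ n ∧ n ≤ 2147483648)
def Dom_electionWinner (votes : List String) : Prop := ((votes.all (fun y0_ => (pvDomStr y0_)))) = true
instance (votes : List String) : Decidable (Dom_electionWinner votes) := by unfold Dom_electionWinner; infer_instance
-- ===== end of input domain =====

-- B folds A's three phases (max of values, filter ties, reverse-sort and take the head)
-- into one maintaining pass over the counted items; equivalent on nonempty vote lists (A raises on []).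


-- ===== PORT A =====
def electionWinner (votes : List String) : String :=
  -- counterList = {}; counterList.update(Counter(votes))
  let counterList := PySem.Dict.update (PySem.Dict.empty : PySem.Dict String Int)
      (PySem.Dict.counter votes).items
  -- maxVotes = max(counterList.values())  (raises ValueError on empty: the `none` branch)
  match PySem.List.max? counterList.values (fun v => v) with
  | none => ""
  | some maxVotes =>
    let newList := counterList.items.foldl
      (fun acc kv => if kv.2 == maxVotes then acc ++ [kv.1] else acc) ([] : List String)
    let answer := PySem.List.sorted newList (fun x => x) true
    (PySem.List.pyGet? answer 0).getD ""

-- ===== PORT B =====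
def electionWinner_alt (votes : List String) : String :=
  let counts := votes.foldl (fun d v => d.insert v (d.getD v 0 + 1))
      (PySem.Dict.empty : PySem.Dict String Int)
  -- best_name, best_count = next(iter(counts.items()))  (raises StopIteration on empty: the `[]` branch)
  match counts.items with
  | [] => ""
  | p :: rest =>
    (rest.foldl (fun best q =>
        if best.2 < q.2 || (q.2 == best.2 && best.1 < q.1) then q else best) p).1

-- ===== PRECONDITION & SPEC =====
-- Pre_ excludes only the empty list, on which A raises ValueError (max() of an empty sequence).
def Pre_electionWinner (votes : List String) : Prop := votes ≠ []
instance (votes : List String) : Decidable (Pre_electionWinner votes) := by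
  unfold Pre_electionWinner; infer_instance
def pvWitness_electionWinner : List String := (["a", "b", "a"])
def Spec_electionWinner (votes : List String) (out : String) : Prop := out = electionWinner_alt votes
instance (votes : List String) (out : String) : Decidable (Spec_electionWinner votes out) := by
  unfold Spec_electionWinner; infer_instance

-- ===== CLAIM (what is proved, stated in full; the proofs are below) =====
def Claim_equal_electionWinner : Prop := ∀ (votes : List String), Dom_electionWinner votes → Pre_electionWinner votes → Spec_electionWinner votes (electionWinner votes)

-- ===== LEMMAS AND PROOFS =====

-- `pvLe q m` : (q.2, q.1) ≤ (m.2, m.1) lexicographically — "m beats or ties-and-outranks q".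
def pvLe (q m : String × Int) : Prop := q.2 < m.2 ∨ (q.2 = m.2 ∧ q.1 ≤ m.1)

theorem pvLe_refl (q : String × Int) : pvLe q q := Or.inr ⟨rfl, le_refl _⟩

theorem pvLe_trans {a b c : String × Int} (h1 : pvLe a b) (h2 : pvLe b c) : pvLe a c := by
  rcases h1 with h1 | ⟨e1, l1⟩ <;> rcases h2 with h2 | ⟨e2, l2⟩
  · exact Or.inl (h1.trans h2)
  · exact Or.inl (e2 ▸ h1)
  · exact Or.inl (e1 ▸ h2)
  · exact Or.inr ⟨e1.trans e2, l1.trans l2⟩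

def pvBest (p : String × Int) (l : List (String × Int)) : String × Int :=
  l.foldl (fun best q =>
    if best.2 < q.2 || (q.2 == best.2 && best.1 < q.1) then q else best) p

theorem pvBest_mem (p : String × Int) (l : List (String × Int)) :
    pvBest p l ∈ p :: l := by
  induction l generalizing p with
  | nil => simp [pvBest]
  | cons a t ih =>
    simp only [pvBest, List.foldl_cons]
    by_cases h : (decide (p.2 < a.2) || (a.2 == p.2 && decide (p.1 < a.1))) = true
    · rw [if_pos h]
      exact List.mem_cons_of_mem p (ih a)
    · rw [if_neg h]
      rcases List.mem_cons.mp (ih p) with h' | h'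
      · show pvBest p t ∈ p :: a :: t; rw [h']; exact List.mem_cons_self
      · exact List.mem_cons_of_mem _ (List.mem_cons_of_mem _ h')

theorem pvBest_isMax (p : String × Int) (l : List (String × Int)) :
    ∀ q ∈ p :: l, pvLe q (pvBest p l) := by
  induction l generalizing p with
  | nil => intro q hq; simp at hq; subst hq; exact pvLe_refl _
  | cons a t ih =>
    intro q hq
    simp only [pvBest, List.foldl_cons]
    by_cases h : (decide (p.2 < a.2) || (a.2 == p.2 && decide (p.1 < a.1))) = true
    · rw [if_pos h]
      have hpa : pvLe p a := by
        simp only [Bool.or_eq_true, Bool.and_eq_true, decide_eq_true_eq, beq_iff_eq] at h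
        rcases h with h | ⟨h1, h2⟩
        · exact Or.inl h
        · exact Or.inr ⟨h1.symm, le_of_lt h2⟩
      rcases List.mem_cons.mp hq with h' | hq'
      · rw [h']; exact pvLe_trans hpa (ih a a List.mem_cons_self)
      · exact ih a q hq'
    · rw [if_neg h]
      have hap : pvLe a p := by
        simp only [Bool.or_eq_true, Bool.and_eq_true, decide_eq_true_eq, beq_iff_eq,
          not_or, not_and] at h
        obtain ⟨h1, h2⟩ := h
        by_cases he : a.2 = p.2
        · exact Or.inr ⟨he, not_lt.mp (h2 he)⟩
        · exact Or.inl (lt_of_le_of_ne (not_lt.mp h1) he)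
      rcases List.mem_cons.mp hq with h' | hq'
      · rw [h']; exact ih p p List.mem_cons_self
      · rcases List.mem_cons.mp hq' with h'' | hq''
        · rw [h'']; exact pvLe_trans hap (ih p p List.mem_cons_self)
        · exact ih p q (List.mem_cons_of_mem _ hq'')

-- A's dict `{}.update(Counter(votes))` is Counter(votes) itself.
theorem pvDictA (votes : List String) :
    PySem.Dict.update (PySem.Dict.empty : PySem.Dict String Int)
      (PySem.Dict.counter votes).items = PySem.Dict.counter votes := by
  apply PySem.Dict.ext
  show (List.foldl (fun acc p => acc.insert p.1 p.2) PySem.Dict.empty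
      (PySem.Dict.counter votes).items).items = _
  rw [PySem.Dict.items_foldl_insert_fresh _ Prod.fst Prod.snd _ (fun a _ => rfl)
      (PySem.Dict.nodup_keys_counter votes)]
  simp [PySem.Dict.empty]

theorem pvMain (votes : List String) (h : votes ≠ []) :
    electionWinner votes = electionWinner_alt votes := by
  simp only [electionWinner, electionWinner_alt]
  rw [pvDictA, PySem.Dict.foldl_insert_getD_add_one_eq_counter]
  set d := PySem.Dict.counter votes with hd
  have hitems : d.items ≠ [] := by
    rw [hd, PySem.Dict.items_counter]
    simp only [ne_eq, List.map_eq_nil_iff]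
    intro hc
    exact h (List.eq_nil_of_subset_nil (fun x hx => by
      have := (PySem.Set.mem_ofList votes x).mpr hx; simp [hc] at this))
  obtain ⟨p, rest, hpr⟩ := List.exists_cons_of_ne_nil hitems
  have hvals : d.values ≠ [] := by
    show d.items.map Prod.snd ≠ []
    simp [hpr]
  obtain ⟨M, hM⟩ : ∃ M, PySem.List.max? d.values (fun v => v) = some M := by
    cases hmx : PySem.List.max? d.values (fun v => v) with
    | none => exact absurd ((PySem.List.max?_eq_none_iff _ _).mp hmx) hvals
    | some m => exact ⟨m, rfl⟩
  rw [hM, hpr]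
  simp only
  set best := pvBest p rest with hbest
  have hbmem : best ∈ d.items := hpr ▸ pvBest_mem p rest
  have hbmax : ∀ q ∈ d.items, pvLe q best := hpr ▸ pvBest_isMax p rest
  -- best.2 = M
  have hMmem : M ∈ d.values := PySem.List.max?_mem hM
  have hMmax : ∀ v ∈ d.values, v ≤ M := fun v hv => PySem.List.max?_isMax hM v hv
  have hb2 : best.2 = M := by
    have h1 : best.2 ≤ M := hMmax _ (List.mem_map_of_mem hbmem)
    obtain ⟨q, hq, hqM⟩ := List.mem_map.mp hMmem
    have h2 : M ≤ best.2 := by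
      rcases hbmax q hq with hlt | ⟨he, _⟩
      · exact hqM ▸ le_of_lt hlt
      · exact hqM ▸ le_of_eq he
    exact le_antisymm h1 h2
  -- newList characterisation
  rw [hpr] at hbmem hbmax
  rw [PySem.List.foldl_append_if (fun kv => kv.2 == M) Prod.fst (p :: rest) []]
  set newList := [] ++ List.map Prod.fst ((p :: rest).filter (fun kv => kv.2 == M)) with hnl
  have hbn : best.1 ∈ newList := by
    rw [hnl]
    exact List.mem_append_right _ (List.mem_map_of_mem
      (List.mem_filter.mpr ⟨hbmem, by simp [hb2]⟩))
  have hnlne : PySem.List.sorted newList (fun x => x) true ≠ [] := by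
    rw [ne_eq, PySem.List.sorted_eq_nil_iff]
    intro hc; rw [hc] at hbn; exact (List.not_mem_nil) hbn
  obtain ⟨m0, t0, hsrt⟩ := List.exists_cons_of_ne_nil hnlne
  rw [hsrt]
  have hm0mem : m0 ∈ newList := (PySem.List.mem_sorted _ _ _ _).mp (hsrt ▸ List.mem_cons_self)
  have hle1 : best.1 ≤ m0 := PySem.List.key_head_sorted_rev_ge newList (fun x => x) hsrt _ hbn
  have hle2 : m0 ≤ best.1 := by
    rw [hnl, List.nil_append] at hm0mem
    obtain ⟨q, hq, hq1⟩ := List.mem_map.mp hm0mem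
    have hqf := List.mem_filter.mp hq
    have hq2 : q.2 = M := by simpa using hqf.2
    rcases hbmax q hqf.1 with hlt | ⟨_, hle⟩
    · rw [hq2, hb2] at hlt; exact absurd hlt (lt_irrefl M)
    · rw [← hq1]; exact hle
  show (PySem.List.pyGet? (m0 :: t0) 0).getD "" = best.1
  simp [PySem.List.pyGet?, PySem.List.pyIdx?]
  exact le_antisymm hle2 hle1

-- ===== VERDICT (by name: the statement is the Claim_ definition above) =====
theorem electionWinner_spec : Claim_equal_electionWinner := by
  intro votes _ hpre
  unfold Spec_electionWinner
  exact pvMain votes hpre
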